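-- pv_equiv track=rewrite | github.com/S-Christensen/cartographersStudy | backend/scoringCards.py | clawsgravepeaks
-- ===== SOURCE A (Python) =====
-- def dfs(grid, row, col, visited, terrain_type):
--     stack = [(row, col)]
--     cluster = []
--
--     while stack:
--         r, c = stack.pop()
--         if (r, c) not in visited and grid[r][c] == terrain_type:
--             visited.add((r, c))
--             cluster.append((r, c))
--             for dr, dc in [(1, 0), (-1, 0), (0, 1), (0, -1)]:
--                 nr, nc = r + dr, c + dc
--                 if 0 <= nr < len(grid) and 0 <= nc < len(grid[0]):
--                     stack.append((nr, nc))
--     return cluster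
--
-- def has_Mountain_and_Farm(grid, cluster):
--     Mountains = set()
--     Farms = set()
--
--     for r, c in cluster:
--         for dr, dc in [(1, 0), (-1, 0), (0, 1), (0, -1)]:
--             nr, nc = r + dr, c + dc
--             if 0 <= nr < len(grid) and 0 <= nc < len(grid[0]):
--                 if grid[nr][nc] == "Mountain":
--                     Mountains.add((nr, nc))
--                 if grid[nr][nc] == "Farm":
--                     Farms.add((nr, nc))
--     return Mountains, Farms
--
-- def clawsgravepeaks(grid):
--     visited = set()
--     clusters = []
--     Mountain_count = 0
--
--     for row in range(len(grid)):
--         for col in range(len(grid[0])):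
--             if (row, col) not in visited and grid[row][col] == "Water":
--                 cluster = dfs(grid, row, col, visited, "Water")
--                 clusters.append(cluster)
--
--     for cluster in clusters:
--         Mountains, Farms = has_Mountain_and_Farm(grid, cluster)
--         if Farms:
--             Mountain_count += len(Mountains)
--
--     return Mountain_count*5
-- ===== SOURCE B (Python) =====
-- def _flood(grid, row, col, visited):
--     # Flood one Water component; fuse the scoring scan into the traversal:
--     # collect distinct adjacent Mountain cells and whether any Farm is adjacent.
--     H, W = len(grid), len(grid[0])
--     mountains = set()
--     farm = False
--     stack = [(row, col)]
--     while stack: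
--         r, c = stack.pop()
--         if (r, c) in visited or grid[r][c] != "Water":
--             continue
--         visited.add((r, c))
--         for dr, dc in ((1, 0), (-1, 0), (0, 1), (0, -1)):
--             nr, nc = r + dr, c + dc
--             if 0 <= nr < H and 0 <= nc < W:
--                 t = grid[nr][nc]
--                 if t == "Mountain":
--                     mountains.add((nr, nc))
--                 elif t == "Farm":
--                     farm = True
--                 stack.append((nr, nc))
--     return mountains, farm
--
-- def clawsgravepeaks(grid):
--     if not grid:
--         return 0
--     H, W = len(grid), len(grid[0])
--     visited = set()
--     total = 0
--     for row in range(H):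
--         for col in range(W):
--             if (row, col) not in visited and grid[row][col] == "Water":
--                 mountains, farm = _flood(grid, row, col, visited)
--                 if farm:
--                     total += len(mountains)
--     return total * 5
-- ===== Notes on version B (the rewrite author's own statement) =====
-- stated objective: simpler
-- what changed: B fuses A's two phases into one: instead of collecting every Water cluster as a list and then re-scanning each cluster's neighbours in a second pass (building Mountain and Farm coordinate sets per cluster), B scores each component during the flood fill itself, classifying neighbours (distinct Mountain set, one Farm flag) as they are pushed, so cluster lists and the whole second phase disappear.
import Mathlib
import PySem

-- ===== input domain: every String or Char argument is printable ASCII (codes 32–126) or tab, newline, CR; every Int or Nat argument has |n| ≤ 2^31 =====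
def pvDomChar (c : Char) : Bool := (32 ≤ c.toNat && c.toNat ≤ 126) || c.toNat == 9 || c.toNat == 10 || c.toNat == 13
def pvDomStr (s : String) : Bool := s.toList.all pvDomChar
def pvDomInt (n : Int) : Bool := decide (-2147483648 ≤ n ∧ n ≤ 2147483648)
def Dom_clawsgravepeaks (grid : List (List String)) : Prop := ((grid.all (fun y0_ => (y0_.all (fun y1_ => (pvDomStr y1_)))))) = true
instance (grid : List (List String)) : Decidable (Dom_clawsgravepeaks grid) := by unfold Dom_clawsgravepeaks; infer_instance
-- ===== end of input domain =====

-- B fuses A's two phases (collect clusters, then re-scan each cluster's neighbours) into one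
-- flood-fill pass that scores each Water component as it is traversed (objective: simpler).

-- shared small helpers (identical lines in both Pythons): cell read, bounds test, the 4 directions
def pvDirs : List (Int × Int) := [(1, 0), (-1, 0), (0, 1), (0, -1)]

def pvCell (grid : List (List String)) (r c : Int) : String :=
  PySem.List.pyGetD (PySem.List.pyGetD grid r []) c ""

def pvInB (H W : Int) (p : Int × Int) : Bool :=
  decide (0 ≤ p.1) && decide (p.1 < H) && decide (0 ≤ p.2) && decide (p.2 < W)

def pvPush (H W r c : Int) (st : List (Int × Int)) (d : Int × Int) : List (Int × Int) :=
  if pvInB H W (r + d.1, c + d.2) then (r + d.1, c + d.2) :: st else st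

-- fuel bound for the while-loops (total pushes in one call ≤ 1 + 4·H·W); identical in both ports
def pvFuel (grid : List (List String)) : Nat :=
  1 + 4 * grid.length * (grid.headD []).length

-- ===== PORT A =====
-- dfs: pop, re-check visited/terrain, push all in-bounds neighbours, collect the cluster
def dfsLoopA (grid : List (List String)) (H W : Int) :
    Nat → List (Int × Int) → PySem.Set (Int × Int) → List (Int × Int) →
    PySem.Set (Int × Int) × List (Int × Int)
  | 0, _, visited, cluster => (visited, cluster)
  | _ + 1, [], visited, cluster => (visited, cluster)
  | fuel + 1, p :: rest, visited, cluster =>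
    if !(PySem.Set.contains visited p) && (pvCell grid p.1 p.2 == "Water") then
      dfsLoopA grid H W fuel (pvDirs.foldl (pvPush H W p.1 p.2) rest)
        (PySem.Set.add visited p) (cluster ++ [p])
    else
      dfsLoopA grid H W fuel rest visited cluster

-- has_Mountain_and_Farm per-direction updates (two independent ifs under the bounds check)
def pvMAdd (grid : List (List String)) (H W r c : Int)
    (ms : PySem.Set (Int × Int)) (d : Int × Int) : PySem.Set (Int × Int) :=
  if pvInB H W (r + d.1, c + d.2) then
    (if pvCell grid (r + d.1) (c + d.2) == "Mountain" then
      PySem.Set.add ms (r + d.1, c + d.2) else ms)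
  else ms

def pvFAdd (grid : List (List String)) (H W r c : Int)
    (fs : PySem.Set (Int × Int)) (d : Int × Int) : PySem.Set (Int × Int) :=
  if pvInB H W (r + d.1, c + d.2) then
    (if pvCell grid (r + d.1) (c + d.2) == "Farm" then
      PySem.Set.add fs (r + d.1, c + d.2) else fs)
  else fs

def hmfA (grid : List (List String)) (H W : Int) (cluster : List (Int × Int)) :
    PySem.Set (Int × Int) × PySem.Set (Int × Int) :=
  cluster.foldl
    (fun acc p => pvDirs.foldl
      (fun a d => (pvMAdd grid H W p.1 p.2 a.1 d, pvFAdd grid H W p.1 p.2 a.2 d)) acc)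
    (PySem.Set.empty, PySem.Set.empty)

def clawsgravepeaks (grid : List (List String)) : Int :=
  let H : Int := grid.length
  let W : Int := (PySem.List.pyGetD grid 0 []).length
  let st := (PySem.List.pyRange 0 H 1).foldl (fun st row =>
      (PySem.List.pyRange 0 W 1).foldl (fun st col =>
        if !(PySem.Set.contains st.1 (row, col)) && (pvCell grid row col == "Water") then
          let r := dfsLoopA grid H W (pvFuel grid) [(row, col)] st.1 []
          (r.1, st.2 ++ [r.2])
        else st) st)
      ((PySem.Set.empty : PySem.Set (Int × Int)), ([] : List (List (Int × Int))))
  (st.2.foldl (fun cnt cl =>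
      if !(hmfA grid (grid.length : Int) ((PySem.List.pyGetD grid 0 []).length : Int) cl).2.isEmpty then
        cnt + (((hmfA grid (grid.length : Int) ((PySem.List.pyGetD grid 0 []).length : Int) cl).1.length : Int))
      else cnt) 0) * 5

-- ===== PORT B =====
-- per-direction farm flag update (B's if/elif: Mountain branch first, else Farm sets the flag)
def pvFOr (grid : List (List String)) (H W r c : Int) (farm : Bool) (d : Int × Int) : Bool :=
  if pvInB H W (r + d.1, c + d.2) then
    (if pvCell grid (r + d.1) (c + d.2) == "Mountain" then farm
     else if pvCell grid (r + d.1) (c + d.2) == "Farm" then true else farm)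
  else farm

-- _flood: one pass; classify each in-bounds neighbour while pushing it
def floodLoopB (grid : List (List String)) (H W : Int) :
    Nat → List (Int × Int) → PySem.Set (Int × Int) → PySem.Set (Int × Int) → Bool →
    PySem.Set (Int × Int) × PySem.Set (Int × Int) × Bool
  | 0, _, v, ms, farm => (v, ms, farm)
  | _ + 1, [], v, ms, farm => (v, ms, farm)
  | fuel + 1, p :: rest, v, ms, farm =>
    if PySem.Set.contains v p || !(pvCell grid p.1 p.2 == "Water") then
      floodLoopB grid H W fuel rest v ms farm
    else
      let s := pvDirs.foldl (fun a d =>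
          (pvPush H W p.1 p.2 a.1 d, pvMAdd grid H W p.1 p.2 a.2.1 d,
           pvFOr grid H W p.1 p.2 a.2.2 d)) (rest, ms, farm)
      floodLoopB grid H W fuel s.1 (PySem.Set.add v p) s.2.1 s.2.2

def clawsgravepeaks_alt (grid : List (List String)) : Int :=
  if grid.isEmpty then 0 else
  let H : Int := grid.length
  let W : Int := (PySem.List.pyGetD grid 0 []).length
  let st := (PySem.List.pyRange 0 H 1).foldl (fun st row =>
      (PySem.List.pyRange 0 W 1).foldl (fun st col =>
        if !(PySem.Set.contains st.1 (row, col)) && (pvCell grid row col == "Water") then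
          let r := floodLoopB grid H W (pvFuel grid) [(row, col)] st.1 PySem.Set.empty false
          (r.1, if r.2.2 then st.2 + (r.2.1.length : Int) else st.2)
        else st) st)
      ((PySem.Set.empty : PySem.Set (Int × Int)), (0 : Int))
  st.2 * 5

-- ===== PRECONDITION & SPEC =====
-- Pre_ excludes ragged grids with a row shorter than row 0, on which Python A raises IndexError
-- (B raises there too).
def Pre_clawsgravepeaks (grid : List (List String)) : Prop :=
  ∀ row ∈ grid, (grid.headD []).length ≤ row.length
instance (grid : List (List String)) : Decidable (Pre_clawsgravepeaks grid) := by
  unfold Pre_clawsgravepeaks; infer_instance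

def pvWitness_clawsgravepeaks : List (List String) :=
  [["Water", "Mountain"], ["Farm", "Water"]]

def Spec_clawsgravepeaks (grid : List (List String)) (out : Int) : Prop := out = clawsgravepeaks_alt grid
instance (grid : List (List String)) (out : Int) : Decidable (Spec_clawsgravepeaks grid out) := by
  unfold Spec_clawsgravepeaks; infer_instance

-- ===== CLAIM (what is proved, stated in full; the proofs are below) =====
def Claim_equal_clawsgravepeaks : Prop := ∀ (grid : List (List String)), Dom_clawsgravepeaks grid → Pre_clawsgravepeaks grid → Spec_clawsgravepeaks grid (clawsgravepeaks grid)

-- ===== LEMMAS AND PROOFS =====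

-- has any in-bounds "Farm" neighbour
def pvHasFarm (grid : List (List String)) (H W r c : Int) : Bool :=
  pvDirs.any (fun d => pvInB H W (r + d.1, c + d.2) &&
    (pvCell grid (r + d.1) (c + d.2) == "Farm"))

-- B's running mountain set over a cluster, and the cluster farm flag
def pvScanM (grid : List (List String)) (H W : Int)
    (ms : PySem.Set (Int × Int)) (cl : List (Int × Int)) : PySem.Set (Int × Int) :=
  cl.foldl (fun ms p => pvDirs.foldl (pvMAdd grid H W p.1 p.2) ms) ms

def pvClFarm (grid : List (List String)) (H W : Int) (cl : List (Int × Int)) : Bool :=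
  cl.any (fun p => pvHasFarm grid H W p.1 p.2)

lemma set_add_isEmpty (s : PySem.Set (Int × Int)) (p : Int × Int) :
    (PySem.Set.add s p).isEmpty = false := by
  rw [PySem.Set.add_eq_ite]
  split
  · rename_i h
    cases s with
    | nil => simp at h
    | cons x t => simp
  · simp

-- folding pvFOr over directions = or of the farm tests
lemma fOr_fold (grid : List (List String)) (H W r c : Int) (l : List (Int × Int)) :
    ∀ farm, l.foldl (pvFOr grid H W r c) farm =
      (farm || l.any (fun d => pvInB H W (r + d.1, c + d.2) &&
        (pvCell grid (r + d.1) (c + d.2) == "Farm"))) := by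
  induction l with
  | nil => simp
  | cons d l ih =>
    intro farm
    have hstep : pvFOr grid H W r c farm d =
        (farm || (pvInB H W (r + d.1, c + d.2) &&
          (pvCell grid (r + d.1) (c + d.2) == "Farm"))) := by
      unfold pvFOr
      by_cases hb : pvInB H W (r + d.1, c + d.2) = true
      · rw [if_pos hb]
        by_cases hm : (pvCell grid (r + d.1) (c + d.2) == "Mountain") = true
        · have hs : pvCell grid (r + d.1) (c + d.2) = "Mountain" := eq_of_beq hm
          rw [if_pos hm, hs]
          simp
        · rw [if_neg hm]
          by_cases hf : (pvCell grid (r + d.1) (c + d.2) == "Farm") = true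
          · rw [if_pos hf]; simp [hb, hf]
          · rw [if_neg hf]; simp [hb, hf]
      · rw [if_neg hb]
        simp [Bool.not_eq_true] at hb
        simp [hb]
    simp only [List.foldl_cons, List.any_cons, ih, hstep, Bool.or_assoc]

-- folding pvFAdd over directions: the farm set is empty iff it was and there is no farm neighbour
lemma fAdd_fold_isEmpty (grid : List (List String)) (H W r c : Int) (l : List (Int × Int)) :
    ∀ fs : PySem.Set (Int × Int), (l.foldl (pvFAdd grid H W r c) fs).isEmpty =
      (fs.isEmpty && !(l.any (fun d => pvInB H W (r + d.1, c + d.2) &&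
        (pvCell grid (r + d.1) (c + d.2) == "Farm")))) := by
  induction l with
  | nil => simp
  | cons d l ih =>
    intro fs
    simp only [List.foldl_cons, List.any_cons]
    rw [ih]
    have hstep : (pvFAdd grid H W r c fs d).isEmpty =
        (fs.isEmpty && !(pvInB H W (r + d.1, c + d.2) &&
          (pvCell grid (r + d.1) (c + d.2) == "Farm"))) := by
      unfold pvFAdd
      by_cases hb : pvInB H W (r + d.1, c + d.2) = true
      · rw [if_pos hb]
        by_cases hf : (pvCell grid (r + d.1) (c + d.2) == "Farm") = true
        · rw [if_pos hf]; simp [hb, hf, set_add_isEmpty]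
        · rw [if_neg hf]; simp [hb, hf]
      · rw [if_neg hb]
        simp [Bool.not_eq_true] at hb
        simp [hb]
    rw [hstep]
    cases fs.isEmpty <;> simp

-- A's per-cluster neighbour-scan pair fold splits into its two independent components
lemma hmfA_split (grid : List (List String)) (H W : Int) (cl : List (Int × Int)) :
    hmfA grid H W cl =
      (pvScanM grid H W PySem.Set.empty cl,
       cl.foldl (fun fs p => pvDirs.foldl (pvFAdd grid H W p.1 p.2) fs) PySem.Set.empty) := by
  unfold hmfA pvScanM
  rw [show (fun (acc : PySem.Set (Int × Int) × PySem.Set (Int × Int)) (p : Int × Int) =>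
        pvDirs.foldl (fun a d => (pvMAdd grid H W p.1 p.2 a.1 d, pvFAdd grid H W p.1 p.2 a.2 d)) acc)
      = (fun acc p => (pvDirs.foldl (pvMAdd grid H W p.1 p.2) acc.1,
          pvDirs.foldl (pvFAdd grid H W p.1 p.2) acc.2)) from
    funext fun acc => funext fun p => by
      rw [← Prod.mk.eta (p := acc), PySem.List.foldl_prod_mk]]
  exact PySem.List.foldl_prod_mk (fun ms p => pvDirs.foldl (pvMAdd grid H W p.1 p.2) ms)
    (fun fs p => pvDirs.foldl (pvFAdd grid H W p.1 p.2) fs) cl PySem.Set.empty PySem.Set.empty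

-- the farm-set component of A's scan is empty iff the cluster has no farm neighbour
lemma fsFold_isEmpty (grid : List (List String)) (H W : Int) (cl : List (Int × Int)) :
    ∀ fs : PySem.Set (Int × Int),
      (cl.foldl (fun fs p => pvDirs.foldl (pvFAdd grid H W p.1 p.2) fs) fs).isEmpty =
        (fs.isEmpty && !(pvClFarm grid H W cl)) := by
  induction cl with
  | nil => intro fs; simp [pvClFarm]
  | cons p cl ih =>
    intro fs
    simp only [List.foldl_cons, pvClFarm, List.any_cons]
    rw [ih, fAdd_fold_isEmpty]
    simp only [pvClFarm, pvHasFarm]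
    cases fs.isEmpty <;> simp

-- A's dfs loop with a cluster accumulator
lemma dfsA_acc (grid : List (List String)) (H W : Int) (fuel : Nat) :
    ∀ (stack : List (Int × Int)) (v : PySem.Set (Int × Int)) (cl : List (Int × Int)),
      dfsLoopA grid H W fuel stack v cl =
        ((dfsLoopA grid H W fuel stack v []).1, cl ++ (dfsLoopA grid H W fuel stack v []).2) := by
  induction fuel with
  | zero => intro stack v cl; simp [dfsLoopA]
  | succ fuel ih =>
    intro stack v cl
    cases stack with
    | nil => simp [dfsLoopA]
    | cons p rest =>
      rw [dfsLoopA, dfsLoopA]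
      by_cases h : (!(PySem.Set.contains v p) && (pvCell grid p.1 p.2 == "Water")) = true
      · rw [if_pos h, if_pos h,
          ih (pvDirs.foldl (pvPush H W p.1 p.2) rest) (PySem.Set.add v p) (cl ++ [p]),
          ih (pvDirs.foldl (pvPush H W p.1 p.2) rest) (PySem.Set.add v p) ([] ++ [p])]
        simp
      · rw [if_neg h, if_neg h, ih rest v cl]

-- lockstep: B's fused flood equals A's dfs plus the scoring scans over its cluster
lemma flood_eq_dfs (grid : List (List String)) (H W : Int) (fuel : Nat) :
    ∀ (stack : List (Int × Int)) (v ms : PySem.Set (Int × Int)) (farm : Bool),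
      floodLoopB grid H W fuel stack v ms farm =
        ((dfsLoopA grid H W fuel stack v []).1,
         pvScanM grid H W ms (dfsLoopA grid H W fuel stack v []).2,
         farm || pvClFarm grid H W (dfsLoopA grid H W fuel stack v []).2) := by
  induction fuel with
  | zero => intro stack v ms farm; simp [floodLoopB, dfsLoopA, pvScanM, pvClFarm]
  | succ fuel ih =>
    intro stack v ms farm
    cases stack with
    | nil => simp [floodLoopB, dfsLoopA, pvScanM, pvClFarm]
    | cons p rest =>
      rw [floodLoopB, dfsLoopA]
      by_cases h : (!(PySem.Set.contains v p) && (pvCell grid p.1 p.2 == "Water")) = true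
      · have h2 := h
        simp only [Bool.and_eq_true, Bool.not_eq_true'] at h2
        have h' : (PySem.Set.contains v p || !(pvCell grid p.1 p.2 == "Water")) = false := by
          rw [h2.1, h2.2]; rfl
        rw [if_neg (by rw [h']; simp), if_pos h]
        have hsplit : pvDirs.foldl (fun a d =>
            (pvPush H W p.1 p.2 a.1 d, pvMAdd grid H W p.1 p.2 a.2.1 d,
             pvFOr grid H W p.1 p.2 a.2.2 d)) (rest, ms, farm)
            = (pvDirs.foldl (pvPush H W p.1 p.2) rest,
               pvDirs.foldl (pvMAdd grid H W p.1 p.2) ms,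
               pvDirs.foldl (pvFOr grid H W p.1 p.2) farm) := by
          rw [PySem.List.foldl_prod_mk (f := pvPush H W p.1 p.2)
              (g := fun a d => (pvMAdd grid H W p.1 p.2 a.1 d, pvFOr grid H W p.1 p.2 a.2 d)),
            PySem.List.foldl_prod_mk]
        simp only [hsplit]
        rw [ih (pvDirs.foldl (pvPush H W p.1 p.2) rest) (PySem.Set.add v p)
            (pvDirs.foldl (pvMAdd grid H W p.1 p.2) ms)
            (pvDirs.foldl (pvFOr grid H W p.1 p.2) farm),
          dfsA_acc grid H W fuel (pvDirs.foldl (pvPush H W p.1 p.2) rest) (PySem.Set.add v p)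
            ([] ++ [p])]
        simp only [List.nil_append, List.singleton_append, Prod.mk.injEq]
        refine ⟨trivial, ?_, ?_⟩
        · simp [pvScanM]
        · rw [fOr_fold]
          simp only [pvClFarm, List.any_cons, pvHasFarm, Bool.or_assoc]
      · have hB : (PySem.Set.contains v p || !(pvCell grid p.1 p.2 == "Water")) = true := by
          cases hcv : PySem.Set.contains v p with
          | true => rfl
          | false =>
            cases hcw : (pvCell grid p.1 p.2 == "Water") with
            | true => exact absurd (by rw [hcv, hcw]; rfl) h
            | false => rfl
        rw [if_pos hB, if_neg h]
        exact ih rest v ms farm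

-- a foldl preserves a binary relation preserved by the steps
lemma foldl_rel {α σ τ : Type} (R : σ → τ → Prop) (f : σ → α → σ) (g : τ → α → τ)
    (h : ∀ s t x, R s t → R (f s x) (g t x)) :
    ∀ (l : List α) (s : σ) (t : τ), R s t → R (l.foldl f s) (l.foldl g t) := by
  intro l
  induction l with
  | nil => intro s t hst; exact hst
  | cons x l ih => intro s t hst; exact ih _ _ (h _ _ _ hst)

-- ===== VERDICT (by name: the statement is the Claim_ definition above) =====
theorem clawsgravepeaks_spec : Claim_equal_clawsgravepeaks := by
  intro grid _ _
  show clawsgravepeaks grid = clawsgravepeaks_alt grid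
  cases grid with
  | nil => rfl
  | cons r0 rows =>
    simp only [clawsgravepeaks, clawsgravepeaks_alt, List.isEmpty_cons, Bool.false_eq_true,
      if_false]
    set g : List (List String) := r0 :: rows with hg
    set H : Int := (g.length : Int) with hH
    set W : Int := ((PySem.List.pyGetD g 0 []).length : Int) with hW
    set step : Int → List (Int × Int) → Int := fun cnt cl =>
      if !(hmfA g H W cl).2.isEmpty then cnt + ((hmfA g H W cl).1.length : Int) else cnt
      with hstep
    suffices hsuff :
        (((PySem.List.pyRange 0 H 1).foldl (fun st row =>
            (PySem.List.pyRange 0 W 1).foldl (fun st col =>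
              if !(PySem.Set.contains st.1 (row, col)) && (pvCell g row col == "Water") then
                let r := floodLoopB g H W (pvFuel g) [(row, col)] st.1 PySem.Set.empty false
                (r.1, if r.2.2 then st.2 + (r.2.1.length : Int) else st.2)
              else st) st)
            ((PySem.Set.empty : PySem.Set (Int × Int)), (0 : Int))).1 =
         ((PySem.List.pyRange 0 H 1).foldl (fun st row =>
            (PySem.List.pyRange 0 W 1).foldl (fun st col =>
              if !(PySem.Set.contains st.1 (row, col)) && (pvCell g row col == "Water") then
                let r := dfsLoopA g H W (pvFuel g) [(row, col)] st.1 []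
                (r.1, st.2 ++ [r.2])
              else st) st)
            ((PySem.Set.empty : PySem.Set (Int × Int)), ([] : List (List (Int × Int))))).1) ∧
        (((PySem.List.pyRange 0 H 1).foldl (fun st row =>
            (PySem.List.pyRange 0 W 1).foldl (fun st col =>
              if !(PySem.Set.contains st.1 (row, col)) && (pvCell g row col == "Water") then
                let r := floodLoopB g H W (pvFuel g) [(row, col)] st.1 PySem.Set.empty false
                (r.1, if r.2.2 then st.2 + (r.2.1.length : Int) else st.2)
              else st) st)
            ((PySem.Set.empty : PySem.Set (Int × Int)), (0 : Int))).2 =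
         ((PySem.List.pyRange 0 H 1).foldl (fun st row =>
            (PySem.List.pyRange 0 W 1).foldl (fun st col =>
              if !(PySem.Set.contains st.1 (row, col)) && (pvCell g row col == "Water") then
                let r := dfsLoopA g H W (pvFuel g) [(row, col)] st.1 []
                (r.1, st.2 ++ [r.2])
              else st) st)
            ((PySem.Set.empty : PySem.Set (Int × Int)), ([] : List (List (Int × Int))))).2.foldl
           step 0) by
      rw [hsuff.2]
    refine foldl_rel
      (R := fun (s : PySem.Set (Int × Int) × List (List (Int × Int)))
              (t : PySem.Set (Int × Int) × Int) =>
        t.1 = s.1 ∧ t.2 = s.2.foldl step 0) _ _ ?_ _ _ _ ⟨rfl, rfl⟩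
    intro s t row hst
    refine foldl_rel
      (R := fun (s : PySem.Set (Int × Int) × List (List (Int × Int)))
              (t : PySem.Set (Int × Int) × Int) =>
        t.1 = s.1 ∧ t.2 = s.2.foldl step 0) _ _ ?_ _ _ _ hst
    intro s t col hst
    obtain ⟨h1, h2⟩ := hst
    by_cases hc : (!(PySem.Set.contains s.1 (row, col)) && (pvCell g row col == "Water")) = true
    · have hc' : (!(PySem.Set.contains t.1 (row, col)) && (pvCell g row col == "Water")) = true := by
        rw [h1]; exact hc
      rw [if_pos hc, if_pos hc']
      rw [h1, flood_eq_dfs]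
      refine ⟨rfl, ?_⟩
      rw [h2, List.foldl_append]
      simp [hstep, hmfA_split, fsFold_isEmpty, PySem.Set.empty, pvScanM]
    · have hc' : ¬ (!(PySem.Set.contains t.1 (row, col)) && (pvCell g row col == "Water")) = true := by
        rw [h1]; exact hc
      rw [if_neg hc, if_neg hc']
      exact ⟨h1, h2⟩
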